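-- pv_equiv track=rewrite | github.com/kb-math/group_theory | group_theory.py | construct_k_distinct_tuples
-- ===== SOURCE A (Python) =====
-- def construct_k_distinct_tuples(input_list, k):
--     if k == 1:
--         return [tuple([x]) for x in input_list]
--
--     k_minus_one_tuples = construct_k_distinct_tuples(input_list, k -1)
--
--     result = []
--     for tuple_ in k_minus_one_tuples:
--         for x in input_list:
--             if x not in tuple_:
--                 result.append(tuple(list(tuple_) + [x]))
--
--     return result
-- ===== SOURCE B (Python) =====
-- def construct_k_distinct_tuples(input_list, k):
--     result = [()]
--     for _ in range(k):
--         nxt = []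
--         for t in result:
--             for x in input_list:
--                 if x not in t:
--                     nxt.append(t + (x,))
--         result = nxt
--     return result
-- ===== Notes on version B (the rewrite author's own statement) =====
-- stated objective: alternative
-- what changed: Replaces A's top-down recursion on k with a bottom-up iterative builder: start from the empty tuple and run k extension rounds, each round rebuilding the list by appending every non-member element to every current tuple.
import Mathlib
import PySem

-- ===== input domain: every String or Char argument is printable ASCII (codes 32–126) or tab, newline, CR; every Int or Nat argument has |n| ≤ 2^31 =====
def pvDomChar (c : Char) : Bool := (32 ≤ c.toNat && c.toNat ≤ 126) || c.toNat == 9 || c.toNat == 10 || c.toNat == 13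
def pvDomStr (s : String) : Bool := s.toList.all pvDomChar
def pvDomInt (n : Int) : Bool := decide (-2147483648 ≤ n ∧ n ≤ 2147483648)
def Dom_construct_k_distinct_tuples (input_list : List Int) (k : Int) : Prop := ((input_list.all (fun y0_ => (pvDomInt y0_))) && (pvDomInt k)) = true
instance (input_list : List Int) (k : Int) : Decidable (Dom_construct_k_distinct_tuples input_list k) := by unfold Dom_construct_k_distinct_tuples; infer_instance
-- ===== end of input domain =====

-- B replaces A's top-down recursion on k with a bottom-up iterative builder (k extension
-- rounds starting from the empty tuple); same cost, proved to return the same list for k ≥ 1.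

-- ===== PORT A =====
-- Literal port of A's recursion on k.  Python diverges (RecursionError) for k < 1; the
-- 'if k < 1 then []' guard only makes the recursion total in Lean — those inputs are
-- outside Pre_construct_k_distinct_tuples and nothing is claimed there.
def construct_k_distinct_tuples (input_list : List Int) (k : Int) : List (List Int) :=
  if k = 1 then input_list.map (fun x => [x])
  else if k < 1 then []
  else
    (construct_k_distinct_tuples input_list (k - 1)).foldl
      (fun result tuple_ =>
        input_list.foldl
          (fun result x => if x ∈ tuple_ then result else result ++ [tuple_ ++ [x]])
          result)
      []
termination_by k.toNat
decreasing_by omega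

-- ===== PORT B =====
-- Literal port of Source B: result = [()], then k rounds rebuilding the list.
def construct_k_distinct_tuples_alt (input_list : List Int) (k : Int) : List (List Int) :=
  (PySem.List.pyRange 0 k 1).foldl
    (fun result _ =>
      result.foldl
        (fun nxt t =>
          input_list.foldl (fun nxt x => if x ∈ t then nxt else nxt ++ [t ++ [x]]) nxt)
        [])
    [[]]

-- ===== PRECONDITION & SPEC =====
-- Pre_ excludes exactly k ≤ 0, where Python A never returns (RecursionError: the
-- recursion k → k-1 has only the k == 1 base case).
def Pre_construct_k_distinct_tuples (input_list : List Int) (k : Int) : Prop := 1 ≤ k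
instance (input_list : List Int) (k : Int) : Decidable (Pre_construct_k_distinct_tuples input_list k) := by unfold Pre_construct_k_distinct_tuples; infer_instance
def pvWitness_construct_k_distinct_tuples : List Int × Int := ([1, 2, 3], 2)

def Spec_construct_k_distinct_tuples (input_list : List Int) (k : Int) (out : List (List Int)) : Prop := out = construct_k_distinct_tuples_alt input_list k
instance (input_list : List Int) (k : Int) (out : List (List Int)) : Decidable (Spec_construct_k_distinct_tuples input_list k out) := by unfold Spec_construct_k_distinct_tuples; infer_instance

-- ===== CLAIM (what is proved, stated in full; the proofs are below) =====
def Claim_equal_construct_k_distinct_tuples : Prop := ∀ (input_list : List Int) (k : Int), Dom_construct_k_distinct_tuples input_list k → Pre_construct_k_distinct_tuples input_list k → Spec_construct_k_distinct_tuples input_list k (construct_k_distinct_tuples input_list k)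

-- ===== LEMMAS AND PROOFS =====

-- One extension round: the shared loop body of both programs.
def pvStep (input_list : List Int) (result : List (List Int)) : List (List Int) :=
  result.foldl
    (fun nxt t =>
      input_list.foldl (fun nxt x => if x ∈ t then nxt else nxt ++ [t ++ [x]]) nxt)
    []

lemma pvFoldl_const {α β : Type} (l : List α) (f : β → β) (init : β) :
    l.foldl (fun r _ => f r) init = f^[l.length] init := by
  induction l generalizing init with
  | nil => rfl
  | cons a t ih => simp [List.foldl, ih, Function.iterate_succ_apply]

lemma pvInner_nil (l : List Int) (acc : List (List Int)) :
    l.foldl (fun a x => if x ∈ ([] : List Int) then a else a ++ [([] : List Int) ++ [x]]) acc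
      = acc ++ l.map (fun x => [x]) := by
  induction l generalizing acc with
  | nil => simp
  | cons a t ih =>
      rw [List.foldl_cons, if_neg (by simp), ih]
      simp

lemma pvStep_base (l : List Int) : pvStep l [[]] = l.map (fun x => [x]) := by
  unfold pvStep
  rw [List.foldl_cons, List.foldl_nil, pvInner_nil]
  simp

lemma pvA_iter (l : List Int) : ∀ n : ℕ,
    construct_k_distinct_tuples l ((n : Int) + 1) = (pvStep l)^[n + 1] [[]] := by
  intro n
  induction n with
  | zero =>
      rw [construct_k_distinct_tuples]
      simp [pvStep_base]
  | succ m ih =>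
      rw [construct_k_distinct_tuples, if_neg (by omega), if_neg (by omega)]
      have hk : (((m + 1 : ℕ) : Int) + 1) - 1 = (m : Int) + 1 := by push_cast; ring
      rw [hk, ih, Function.iterate_succ_apply' (pvStep l) (m + 1)]
      rfl

lemma pvAlt_iter (l : List Int) (k : Int) :
    construct_k_distinct_tuples_alt l k = (pvStep l)^[(PySem.List.pyRange 0 k 1).length] [[]] := by
  unfold construct_k_distinct_tuples_alt
  exact pvFoldl_const _ (pvStep l) _

-- ===== VERDICT (by name: the statement is the Claim_ definition above) =====
theorem construct_k_distinct_tuples_spec : Claim_equal_construct_k_distinct_tuples := by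
  intro l k _dom hpre
  unfold Spec_construct_k_distinct_tuples
  have hpre' : (1 : Int) ≤ k := hpre
  obtain ⟨n, rfl⟩ : ∃ n : ℕ, k = (n : Int) + 1 := ⟨(k - 1).toNat, by omega⟩
  rw [pvA_iter, pvAlt_iter, PySem.List.length_pyRange_one]
  congr 1
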